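-- pv_equiv track=rewrite | github.com/kerthcet/tbcd-errbot | plugins/gitlab/gitlab.py | get_bumpversion
-- ===== SOURCE A (Python) =====
-- BUMP_KEY_WORDS = 'Bump version'
--
-- def get_bumpversion(body):
--     length = len(body['commits'])
--     for i in range(length - 1, -1, -1):
--         msg = body['commits'][i]
--
--         for m in msg['message'].split('\n'):
--             if BUMP_KEY_WORDS in m:
--                 return m.split(" ")[-1], True
--
--     return "", False
-- ===== SOURCE B (Python) =====
-- BUMP_KEY_WORDS = 'Bump version'
--
-- def get_bumpversion(body):
--     result = ("", False)
--     for commit in body['commits']: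
--         line = next((m for m in commit['message'].split('\n') if BUMP_KEY_WORDS in m), None)
--         if line is not None:
--             result = (line.split(" ")[-1], True)
--     return result
-- ===== Notes on version B (the rewrite author's own statement) =====
-- stated objective: alternative
-- what changed: Replaces A's reverse index loop with nested early returns by a single forward pass with a last-wins accumulator, finding each commit's first bump line via next() over a generator instead of an inner loop with return.
-- outside the precondition, e.g. on get_bumpversion({'commits': [{}, {'message': 'Bump version v2'}]}): A returns ('v2', True), B raises KeyError
import Mathlib
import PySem

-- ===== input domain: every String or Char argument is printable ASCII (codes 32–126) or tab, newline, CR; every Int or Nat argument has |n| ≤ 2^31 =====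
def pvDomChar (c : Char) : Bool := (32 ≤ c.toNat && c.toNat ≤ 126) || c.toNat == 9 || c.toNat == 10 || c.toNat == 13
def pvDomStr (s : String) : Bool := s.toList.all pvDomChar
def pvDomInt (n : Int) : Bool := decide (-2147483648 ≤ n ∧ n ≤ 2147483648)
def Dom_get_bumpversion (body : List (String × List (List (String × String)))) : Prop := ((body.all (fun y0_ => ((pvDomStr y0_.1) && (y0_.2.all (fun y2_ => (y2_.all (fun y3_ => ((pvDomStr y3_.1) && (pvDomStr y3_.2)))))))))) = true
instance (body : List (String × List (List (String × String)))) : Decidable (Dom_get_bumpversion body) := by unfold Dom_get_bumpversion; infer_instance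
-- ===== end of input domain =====

-- B replaces A's reverse index scan with nested early returns by a forward last-wins
-- accumulator pass; same return value on Pre_ (B's objective: alternative decomposition).

-- m.split(" ")[-1] (split(" ") is never empty, so the [-1] never raises)
def pvLastWord (m : String) : String :=
  (PySem.List.pyGet? ((PySem.Str.split? m " ").getD []) (-1)).getD ""

-- ===== PORT A =====
-- A's inner loop: 'for m in lines: if BUMP_KEY_WORDS in m: return …' — first matching line, as Option
def pvScanLines : List String → Option (String × Bool)
  | [] => none
  | m :: rest =>
    if PySem.Str.isIn "Bump version" m then some (pvLastWord m, true) else pvScanLines rest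

-- A's outer loop over the reversed index range, with early return
def pvALoop (commits : List (List (String × String))) : List Int → String × Bool
  | [] => ("", false)
  | i :: rest =>
    match PySem.List.pyGet? commits i with
    | none => ("", false)  -- IndexError: unreachable, i ranges over valid indices
    | some msg =>
      match PySem.Dict.get? (PySem.Dict.mk msg) "message" with
      | none => ("", false)  -- KeyError: excluded by Pre_
      | some message =>
        match pvScanLines ((PySem.Str.split? message "\n").getD []) with
        | some r => r
        | none => pvALoop commits rest

def get_bumpversion (body : List (String × List (List (String × String)))) : String × Bool :=
  match PySem.Dict.get? (PySem.Dict.mk body) "commits" with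
  | none => ("", false)  -- KeyError: excluded by Pre_
  | some commits =>
    pvALoop commits (PySem.List.pyRange ((commits.length : Int) - 1) (-1) (-1))

-- ===== PORT B =====
def get_bumpversion_alt (body : List (String × List (List (String × String)))) : String × Bool :=
  match PySem.Dict.get? (PySem.Dict.mk body) "commits" with
  | none => ("", false)  -- KeyError: excluded by Pre_
  | some commits =>
    commits.foldl (fun result commit =>
      match PySem.Dict.get? (PySem.Dict.mk commit) "message" with
      | none => result  -- KeyError: excluded by Pre_
      | some message =>
        -- next((m for m in lines if BUMP_KEY_WORDS in m), None)
        match ((PySem.Str.split? message "\n").getD []).find? (fun m => PySem.Str.isIn "Bump version" m) with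
        | some line => (pvLastWord line, true)
        | none => result) ("", false)

-- ===== PRECONDITION & SPEC =====
-- Pre_ excludes bodies lacking the 'commits' key (A raises KeyError) and bodies in which some
-- commit lacks the 'message' key: there A raises KeyError unless a later-listed commit matched
-- first, while B (scanning forward) raises KeyError on every such input.
def Pre_get_bumpversion (body : List (String × List (List (String × String)))) : Prop :=
  (PySem.Dict.get? (PySem.Dict.mk body) "commits").isSome = true ∧
  ∀ c ∈ (PySem.Dict.get? (PySem.Dict.mk body) "commits").getD [],
    (PySem.Dict.get? (PySem.Dict.mk c) "message").isSome = true
instance (body : List (String × List (List (String × String)))) : Decidable (Pre_get_bumpversion body) := by unfold Pre_get_bumpversion; infer_instance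

def pvWitness_get_bumpversion : (List (String × List (List (String × String)))) :=
  [("commits", [[("message", "Bump version 1.2.3")], [("message", "nothing here")]])]

def Spec_get_bumpversion (body : List (String × List (List (String × String)))) (out : String × Bool) : Prop := out = get_bumpversion_alt body
instance (body : List (String × List (List (String × String)))) (out : String × Bool) : Decidable (Spec_get_bumpversion body out) := by unfold Spec_get_bumpversion; infer_instance

-- ===== CLAIM (what is proved, stated in full; the proofs are below) =====
def Claim_equal_get_bumpversion : Prop := ∀ (body : List (String × List (List (String × String)))), Dom_get_bumpversion body → Pre_get_bumpversion body → Spec_get_bumpversion body (get_bumpversion body)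

-- ===== LEMMAS AND PROOFS =====

-- per-commit result, as computed by both sides
def pvF (commit : List (String × String)) : Option (String × Bool) :=
  (PySem.Dict.get? (PySem.Dict.mk commit) "message").bind (fun message =>
    (((PySem.Str.split? message "\n").getD []).find? (fun m => PySem.Str.isIn "Bump version" m)).map
      (fun line => (pvLastWord line, true)))

theorem pvScanLines_eq (l : List String) :
    pvScanLines l = (l.find? (fun m => PySem.Str.isIn "Bump version" m)).map
      (fun line => (pvLastWord line, true)) := by
  induction l with
  | nil => rfl
  | cons m rest ih =>
    rw [pvScanLines]
    cases h : PySem.Str.isIn "Bump version" m with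
    | true => rw [List.find?_cons_of_pos h]; simp
    | false => rw [List.find?_cons_of_neg (by simpa using h), ← ih]; simp

theorem pvB_foldl (commits : List (List (String × String))) (acc : String × Bool) :
    commits.foldl (fun result commit =>
      match PySem.Dict.get? (PySem.Dict.mk commit) "message" with
      | none => result
      | some message =>
        match ((PySem.Str.split? message "\n").getD []).find? (fun m => PySem.Str.isIn "Bump version" m) with
        | some line => (pvLastWord line, true)
        | none => result) acc
    = (commits.reverse.findSome? pvF).getD acc := by
  induction commits generalizing acc with
  | nil => rfl
  | cons c cs ih =>
    simp only [List.foldl_cons, List.reverse_cons, List.findSome?_append, ih]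
    cases h : cs.reverse.findSome? pvF with
    | some r => rfl
    | none =>
      simp only [Option.none_or]
      simp only [pvF, List.findSome?]
      cases hm : PySem.Dict.get? (PySem.Dict.mk c) "message" with
      | none => rfl
      | some message =>
        simp only [Option.bind_some]
        cases hl : ((PySem.Str.split? message "\n").getD []).find? (fun m => PySem.Str.isIn "Bump version" m) with
        | none => rfl
        | some line => rfl

theorem pvALoop_eq (commits : List (List (String × String))) (idxs : List Int)
    (h : ∀ i ∈ idxs, ∃ c, PySem.List.pyGet? commits i = some c ∧
          (PySem.Dict.get? (PySem.Dict.mk c) "message").isSome = true) :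
    pvALoop commits idxs
      = ((idxs.findSome? (fun i => (PySem.List.pyGet? commits i).bind pvF)).getD ("", false)) := by
  induction idxs with
  | nil => rfl
  | cons i rest ih =>
    obtain ⟨c, hc, hm⟩ := h i (List.mem_cons_self ..)
    obtain ⟨message, hmsg⟩ := Option.isSome_iff_exists.mp hm
    have hrest := fun j hj => h j (List.mem_cons_of_mem _ hj)
    have hpf : pvF c = (((PySem.Str.split? message "\n").getD []).find?
        (fun m => PySem.Str.isIn "Bump version" m)).map (fun line => (pvLastWord line, true)) := by
      rw [pvF, hmsg, Option.bind_some]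
    simp only [pvALoop, hc, hmsg, List.findSome?, Option.bind_some, hpf, pvScanLines_eq]
    cases hl : ((PySem.Str.split? message "\n").getD []).find? (fun m => PySem.Str.isIn "Bump version" m) with
    | some line => simp
    | none => simp [ih hrest]

theorem findSome?_congr_mem {α β : Type} (l : List α) (f g : α → Option β)
    (h : ∀ a ∈ l, f a = g a) : l.findSome? f = l.findSome? g := by
  induction l with
  | nil => rfl
  | cons a rest ih =>
    simp only [List.findSome?, h a (List.mem_cons_self ..),
      ih (fun b hb => h b (List.mem_cons_of_mem _ hb))]

-- ===== VERDICT (by name: the statement is the Claim_ definition above) =====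
theorem get_bumpversion_spec : Claim_equal_get_bumpversion := by
  intro body _ hpre
  obtain ⟨hs, hmsgs⟩ := hpre
  unfold Spec_get_bumpversion get_bumpversion get_bumpversion_alt
  obtain ⟨commits, hc⟩ := Option.isSome_iff_exists.mp hs
  rw [hc]
  rw [hc] at hmsgs
  dsimp only
  simp only [Option.getD_some] at hmsgs
  have hrange : PySem.List.pyRange ((commits.length : Int) - 1) (-1) (-1)
      = (PySem.List.pyRange 0 (commits.length : Int) 1).reverse := by
    rw [PySem.List.pyRange_neg_one_eq_reverse]
    norm_num
  have hget : ∀ i ∈ (PySem.List.pyRange 0 (commits.length : Int) 1).reverse,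
      ∃ c, PySem.List.pyGet? commits i = some c ∧
        (PySem.Dict.get? (PySem.Dict.mk c) "message").isSome = true := by
    intro i hi
    rw [List.mem_reverse, PySem.List.mem_pyRange_one] at hi
    obtain ⟨h0, h1⟩ := hi
    have hlt : i.toNat < commits.length := by omega
    refine ⟨commits[i.toNat], ?_, hmsgs _ (commits.getElem_mem hlt)⟩
    simp [PySem.List.pyGet?, PySem.List.pyIdx?, h0, h1, hlt]
  rw [hrange, pvALoop_eq commits _ hget, pvB_foldl]
  congr 1
  have hmap : (PySem.List.pyRange 0 (commits.length : Int) 1).map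
      (fun j => PySem.List.pyGetD commits j []) = commits :=
    PySem.List.map_pyGetD_pyRange_zero' commits []
  conv_rhs => rw [← hmap]
  rw [← List.map_reverse, List.findSome?_map]
  refine findSome?_congr_mem _ _ _ ?_
  intro i hi
  obtain ⟨c, hc', _⟩ := hget i hi
  have : PySem.List.pyGetD commits i [] = c := by
    simp [PySem.List.pyGetD, hc']
  simp [hc', this, Function.comp]
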